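-- pv_equiv track=rewrite | github.com/RichSaunders/AdventOfCode | 2021/day05/part1.py | applyInstruction
-- ===== SOURCE A (Python) =====
-- def applyInstruction(map, instruction):
--     if instruction[0][0] == instruction[1][0]:
--         x = instruction[0][0]
--         start = min(instruction[0][1], instruction[1][1])
--         end = max(instruction[0][1], instruction[1][1])
--         for y in range(start, end+1):
--             map[x,y] += 1
--
--     elif instruction[0][1] == instruction[1][1]:
--         y = instruction[0][1]
--         start = min(instruction[0][0], instruction[1][0])
--         end = max(instruction[0][0], instruction[1][0])
--         for x in range(start, end+1):
--             map[x,y] += 1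
--     return map
-- ===== SOURCE B (Python) =====
-- def applyInstruction(map, instruction):
--     x1, y1 = instruction[0][0], instruction[0][1]
--     x2, y2 = instruction[1][0], instruction[1][1]
--     if x1 == x2 or y1 == y2:
--         lox, hix = min(x1, x2), max(x1, x2)
--         loy, hiy = min(y1, y2), max(y1, y2)
--         for (x, y) in list(map):
--             if lox <= x <= hix and loy <= y <= hiy:
--                 map[x, y] += 1
--     return map
-- ===== Notes on version B (the rewrite author's own statement) =====
-- stated objective: alternative
-- what changed: Instead of enumerating the segment's cells and doing a dict lookup per cell as A does, B makes one pass over the map's existing cells and increments each cell that lies inside the axis-aligned segment's bounding box; the per-cell range loops and dict lookups disappear.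
import Mathlib
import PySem

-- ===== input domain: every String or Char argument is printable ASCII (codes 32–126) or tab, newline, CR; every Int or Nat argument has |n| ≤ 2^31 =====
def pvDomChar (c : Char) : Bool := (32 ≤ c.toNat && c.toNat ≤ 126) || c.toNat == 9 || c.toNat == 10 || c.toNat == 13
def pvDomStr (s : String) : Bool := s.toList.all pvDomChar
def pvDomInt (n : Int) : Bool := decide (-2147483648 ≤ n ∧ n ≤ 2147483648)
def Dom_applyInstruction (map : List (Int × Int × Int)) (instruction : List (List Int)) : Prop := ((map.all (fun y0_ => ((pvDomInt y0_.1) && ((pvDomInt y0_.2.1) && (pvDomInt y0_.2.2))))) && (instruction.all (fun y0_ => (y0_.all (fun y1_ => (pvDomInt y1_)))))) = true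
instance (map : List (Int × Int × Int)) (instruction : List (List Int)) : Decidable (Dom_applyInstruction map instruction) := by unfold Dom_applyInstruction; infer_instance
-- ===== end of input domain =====

-- B replaces A's enumerate-segment-cells-and-look-each-up-in-the-dict loop by a single pass over
-- the map's existing cells, bumping each cell inside the segment's bounding box (objective:
-- alternative). Both Pythons mutate the dict in place (B may also mutate it on inputs where A
-- raises); the claim is about the returned value only.

-- ===== PORT A =====
-- `map[x,y] += 1` on a dict whose key is present: update the first matching entry in place
-- (exact for Python dicts, whose keys are distinct; key presence is required by Pre_).
def pvBump : List (Int × Int × Int) → Int → Int → List (Int × Int × Int)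
  | [], _, _ => []
  | e :: rest, x, y =>
      if e.1 = x ∧ e.2.1 = y then (e.1, e.2.1, e.2.2 + 1) :: rest
      else e :: pvBump rest x y

def applyInstruction (map : List (Int × Int × Int)) (instruction : List (List Int)) : List (Int × Int × Int) :=
  match PySem.List.pyGet? instruction 0, PySem.List.pyGet? instruction 1 with
  | some r0, some r1 =>
    match PySem.List.pyGet? r0 0, PySem.List.pyGet? r0 1,
          PySem.List.pyGet? r1 0, PySem.List.pyGet? r1 1 with
    | some a0, some a1, some b0, some b1 =>
        if a0 = b0 then
          (PySem.List.pyRange (min a1 b1) (max a1 b1 + 1) 1).foldl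
            (fun m y => pvBump m a0 y) map
        else if a1 = b1 then
          (PySem.List.pyRange (min a0 b0) (max a0 b0 + 1) 1).foldl
            (fun m x => pvBump m x a1) map
        else map
    | _, _, _, _ => map  -- IndexError in Python: excluded by Pre_
  | _, _ => map          -- IndexError in Python: excluded by Pre_

-- ===== PORT B =====
-- one pass over the map's cells; `map[x,y] += 1` on a cell we are iterating over is, on the
-- returned value, exactly a pointwise update of that entry
def applyInstruction_alt (map : List (Int × Int × Int)) (instruction : List (List Int)) : List (Int × Int × Int) :=
  match PySem.List.pyGet? instruction 0 with
  | none => map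
  | some r0 =>
  match PySem.List.pyGet? r0 0 with
  | none => map
  | some x1 =>
  match PySem.List.pyGet? r0 1 with
  | none => map
  | some y1 =>
  match PySem.List.pyGet? instruction 1 with
  | none => map
  | some r1 =>
  match PySem.List.pyGet? r1 0 with
  | none => map
  | some x2 =>
  match PySem.List.pyGet? r1 1 with
  | none => map
  | some y2 =>
  if x1 = x2 ∨ y1 = y2 then
    map.map (fun e =>
      if min x1 x2 ≤ e.1 ∧ e.1 ≤ max x1 x2 ∧ min y1 y2 ≤ e.2.1 ∧ e.2.1 ≤ max y1 y2
      then (e.1, e.2.1, e.2.2 + 1) else e)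
  else map

-- ===== PRECONDITION & SPEC =====
-- Pre_ excludes exactly the inputs on which Python A raises — instructions without two rows of
-- length ≥ 2 (IndexError) and axis-aligned segments with a cell missing from the map (KeyError) —
-- plus association lists with duplicate keys, which do not represent any Python dict.
-- (The span ≤ map.length test is a cheap necessary consequence of the membership test, kept so the
-- Decidable instance never builds a huge range.)
def pvHasKey (map : List (Int × Int × Int)) (x y : Int) : Bool :=
  map.any (fun e => e.1 = x ∧ e.2.1 = y)

def pvPreCheck (map : List (Int × Int × Int)) (instruction : List (List Int)) : Bool :=
  match PySem.List.pyGet? instruction 0 with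
  | none => false
  | some r0 =>
  match PySem.List.pyGet? r0 0 with
  | none => false
  | some x1 =>
  match PySem.List.pyGet? r0 1 with
  | none => false
  | some y1 =>
  match PySem.List.pyGet? instruction 1 with
  | none => false
  | some r1 =>
  match PySem.List.pyGet? r1 0 with
  | none => false
  | some x2 =>
  match PySem.List.pyGet? r1 1 with
  | none => false
  | some y2 =>
  if x1 = x2 then
    decide (max y1 y2 + 1 - min y1 y2 ≤ (map.length : Int)) &&
    (PySem.List.pyRange (min y1 y2) (max y1 y2 + 1) 1).all (fun y => pvHasKey map x1 y)
  else if y1 = y2 then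
    decide (max x1 x2 + 1 - min x1 x2 ≤ (map.length : Int)) &&
    (PySem.List.pyRange (min x1 x2) (max x1 x2 + 1) 1).all (fun x => pvHasKey map x y1)
  else true

def Pre_applyInstruction (map : List (Int × Int × Int)) (instruction : List (List Int)) : Prop :=
  pvPreCheck map instruction = true ∧ (map.map (fun e => (e.1, e.2.1))).Nodup
instance (map : List (Int × Int × Int)) (instruction : List (List Int)) : Decidable (Pre_applyInstruction map instruction) := by unfold Pre_applyInstruction; infer_instance

def pvWitness_applyInstruction : (List (Int × Int × Int)) × List (List Int) :=
  ([(0, 1, 0), (0, 2, 5)], [[0, 1], [0, 2]])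

def Spec_applyInstruction (map : List (Int × Int × Int)) (instruction : List (List Int)) (out : List (Int × Int × Int)) : Prop := out = applyInstruction_alt map instruction
instance (map : List (Int × Int × Int)) (instruction : List (List Int)) (out : List (Int × Int × Int)) : Decidable (Spec_applyInstruction map instruction out) := by unfold Spec_applyInstruction; infer_instance

-- ===== CLAIM =====
def Claim_equal_applyInstruction : Prop := ∀ (map : List (Int × Int × Int)) (instruction : List (List Int)), Dom_applyInstruction map instruction → Pre_applyInstruction map instruction → Spec_applyInstruction map instruction (applyInstruction map instruction)

-- ===== LEMMAS AND PROOFS =====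

-- pvBump never changes the key sequence
theorem pvBump_keys (m : List (Int × Int × Int)) (x y : Int) :
    (pvBump m x y).map (fun e => (e.1, e.2.1)) = m.map (fun e => (e.1, e.2.1)) := by
  induction m with
  | nil => rfl
  | cons e rest ih =>
    unfold pvBump
    by_cases h : e.1 = x ∧ e.2.1 = y
    · simp [h]
    · simp [h, ih]

-- on a duplicate-free map, bumping one key is a pointwise update
theorem pvBump_eq_map (m : List (Int × Int × Int)) (x y : Int)
    (hnd : (m.map (fun e => (e.1, e.2.1))).Nodup) :
    pvBump m x y =
      m.map (fun e => if e.1 = x ∧ e.2.1 = y then (e.1, e.2.1, e.2.2 + 1) else e) := by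
  induction m with
  | nil => rfl
  | cons e rest ih =>
    simp only [List.map_cons, List.nodup_cons] at hnd
    unfold pvBump
    by_cases h : e.1 = x ∧ e.2.1 = y
    · simp only [if_pos h, List.map_cons, List.cons.injEq, true_and]
      have : ∀ f ∈ rest, ¬(f.1 = x ∧ f.2.1 = y) := by
        intro f hf hc
        apply hnd.1
        have hm : (f.1, f.2.1) ∈ rest.map (fun e => (e.1, e.2.1)) := List.mem_map_of_mem hf
        rw [hc.1, hc.2] at hm
        rw [h.1, h.2]
        exact hm
      conv_lhs => rw [show rest = rest.map id from (List.map_id rest).symm]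
      exact List.map_congr_left (fun f hf => by simp [this f hf])
    · simp [h, ih hnd.2]

-- folding pvBump over a duplicate-free list of keys is a pointwise membership update
theorem foldl_bump_eq_map (ks : List (Int × Int)) (m : List (Int × Int × Int))
    (hks : ks.Nodup) (hnd : (m.map (fun e => (e.1, e.2.1))).Nodup) :
    ks.foldl (fun m k => pvBump m k.1 k.2) m =
      m.map (fun e => if (e.1, e.2.1) ∈ ks then (e.1, e.2.1, e.2.2 + 1) else e) := by
  induction ks generalizing m with
  | nil => simp
  | cons k ks ih =>
    rcases List.nodup_cons.mp hks with ⟨hk, hks'⟩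
    have hnd' : ((pvBump m k.1 k.2).map (fun e => (e.1, e.2.1))).Nodup := by
      rw [pvBump_keys]; exact hnd
    rw [List.foldl_cons, ih (pvBump m k.1 k.2) hks' hnd',
        pvBump_eq_map m k.1 k.2 hnd, List.map_map]
    refine List.map_congr_left (fun e _ => ?_)
    by_cases h1 : e.1 = k.1 ∧ e.2.1 = k.2
    · simp [Function.comp, h1, hk]
    · have hne : (e.1, e.2.1) ≠ k := by
        intro hc; exact h1 ⟨congrArg Prod.fst hc, congrArg Prod.snd hc⟩
      simp only [Function.comp, if_neg h1]
      by_cases h2 : (e.1, e.2.1) ∈ ks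
      · simp [h2, List.mem_cons, hne]
      · simp [h2, List.mem_cons, hne]

-- ===== VERDICT =====
theorem applyInstruction_spec : Claim_equal_applyInstruction := by
  intro map instruction _ hpre
  obtain ⟨-, hnd⟩ := hpre
  unfold Spec_applyInstruction applyInstruction applyInstruction_alt
  cases h0 : PySem.List.pyGet? instruction 0 with
  | none => simp only [h0]
  | some r0 =>
  cases h1 : PySem.List.pyGet? instruction 1 with
  | none =>
    cases ha0 : PySem.List.pyGet? r0 0 <;> cases ha1 : PySem.List.pyGet? r0 1 <;>
      simp [ha0, ha1]
  | some r1 =>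
  cases ha0 : PySem.List.pyGet? r0 0 with
  | none => simp [ha0]
  | some x1 =>
  cases ha1 : PySem.List.pyGet? r0 1 with
  | none =>
    cases hb0 : PySem.List.pyGet? r1 0 <;> cases hb1 : PySem.List.pyGet? r1 1 <;>
      simp [ha0, ha1, hb0, hb1]
  | some y1 =>
  cases hb0 : PySem.List.pyGet? r1 0 with
  | none => simp [ha0, ha1, hb0]
  | some x2 =>
  cases hb1 : PySem.List.pyGet? r1 1 with
  | none => simp [ha0, ha1, hb0, hb1]
  | some y2 =>
  simp only [ha0, ha1, hb0, hb1]
  by_cases hx : x1 = x2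
  · rw [if_pos hx, if_pos (Or.inl hx)]
    have hfold := foldl_bump_eq_map
      ((PySem.List.pyRange (min y1 y2) (max y1 y2 + 1) 1).map (fun y => (x1, y))) map
      ((PySem.List.nodup_pyRange_one _ _).map (fun a b h => by
        simpa using congrArg Prod.snd h))
      hnd
    rw [List.foldl_map] at hfold
    rw [hfold]
    refine List.map_congr_left (fun e _ => ?_)
    have : ((e.1, e.2.1) ∈ (PySem.List.pyRange (min y1 y2) (max y1 y2 + 1) 1).map (fun y => (x1, y)))
        ↔ (min x1 x2 ≤ e.1 ∧ e.1 ≤ max x1 x2 ∧ min y1 y2 ≤ e.2.1 ∧ e.2.1 ≤ max y1 y2) := by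
      subst hx
      simp only [List.mem_map, PySem.List.mem_pyRange_one, Prod.ext_iff]
      constructor
      · rintro ⟨y, ⟨hy1, hy2⟩, he1, he2⟩
        subst he2; refine ⟨by omega, by omega, by omega, by omega⟩
      · rintro ⟨hl, hr, hy1, hy2⟩
        exact ⟨e.2.1, ⟨hy1, by omega⟩, by omega, rfl⟩
    rw [if_congr this rfl rfl]
  · rw [if_neg hx]
    by_cases hy : y1 = y2
    · rw [if_pos hy, if_pos (Or.inr hy)]
      have hfold := foldl_bump_eq_map
        ((PySem.List.pyRange (min x1 x2) (max x1 x2 + 1) 1).map (fun x => (x, y1))) map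
        ((PySem.List.nodup_pyRange_one _ _).map (fun a b h => by
          simpa using congrArg Prod.fst h))
        hnd
      rw [List.foldl_map] at hfold
      rw [hfold]
      refine List.map_congr_left (fun e _ => ?_)
      have : ((e.1, e.2.1) ∈ (PySem.List.pyRange (min x1 x2) (max x1 x2 + 1) 1).map (fun x => (x, y1)))
          ↔ (min x1 x2 ≤ e.1 ∧ e.1 ≤ max x1 x2 ∧ min y1 y2 ≤ e.2.1 ∧ e.2.1 ≤ max y1 y2) := by
        subst hy
        simp only [List.mem_map, PySem.List.mem_pyRange_one, Prod.ext_iff]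
        constructor
        · rintro ⟨x, ⟨hx1, hx2⟩, he1, he2⟩
          subst he1; refine ⟨by omega, by omega, by omega, by omega⟩
        · rintro ⟨hl, hr, hy1', hy2'⟩
          exact ⟨e.1, ⟨hl, by omega⟩, rfl, by omega⟩
      rw [if_congr this rfl rfl]
    · rw [if_neg hy, if_neg (by tauto)]
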